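-- pv_equiv track=rewrite | github.com/rewardof/LeetCode | all/easy/widest-vertical-area-between-two-points-containing-no-points.py | maxWidthOfVerticalArea2
-- ===== SOURCE A (Python) =====
-- from typing import List
--
-- def maxWidthOfVerticalArea2(points: List[List[int]]) -> int:
--     x = [i[0] for i in points]
--     x.sort()
--     prev = x[0]
--     max_width = 0
--     for i in x:
--         max_width = max(max_width, i - prev)
--         prev = i
--     return max_width
-- ===== SOURCE B (Python) =====
-- from typing import List
--
-- def maxWidthOfVerticalArea2(points: List[List[int]]) -> int:
--     # Selection-based scan: repeatedly extract the minimum x, no sort call.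
--     xs = [p[0] for p in points]
--     prev = min(xs)
--     xs.remove(prev)
--     best = 0
--     while xs:
--         cur = min(xs)
--         best = max(best, cur - prev)
--         xs.remove(cur)
--         prev = cur
--     return best
-- ===== Notes on version B (the rewrite author's own statement) =====
-- stated objective: alternative
-- what changed: Replaces sort-then-adjacent-scan with a selection loop that repeatedly extracts the minimum x and accumulates the gap to the previously extracted minimum (no sort).
import Mathlib
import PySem

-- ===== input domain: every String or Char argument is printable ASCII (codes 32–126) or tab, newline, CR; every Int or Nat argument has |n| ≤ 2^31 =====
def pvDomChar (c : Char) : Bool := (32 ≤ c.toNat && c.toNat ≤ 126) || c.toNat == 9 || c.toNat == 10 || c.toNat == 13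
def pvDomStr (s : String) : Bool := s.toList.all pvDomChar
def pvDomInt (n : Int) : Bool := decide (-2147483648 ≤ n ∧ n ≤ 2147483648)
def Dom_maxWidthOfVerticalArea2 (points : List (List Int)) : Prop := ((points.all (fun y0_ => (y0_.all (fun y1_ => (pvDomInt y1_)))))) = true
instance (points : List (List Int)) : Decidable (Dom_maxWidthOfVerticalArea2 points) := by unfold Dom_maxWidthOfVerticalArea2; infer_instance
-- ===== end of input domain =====

-- B replaces A's sort-then-adjacent-scan by a selection loop (repeated min extraction); alternative structure, not faster.

-- ===== PORT A =====
def maxWidthOfVerticalArea2 (points : List (List Int)) : Int :=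
  let x := PySem.List.sorted (points.map (fun i => (PySem.List.pyGet? i 0).getD 0)) (fun v => v) false
  match x with
  | [] => 0  -- unreachable under Pre_ (Python raises IndexError at x[0])
  | x0 :: _ => (x.foldl (fun s i => (max s.1 (i - s.2), i)) ((0 : Int), x0)).1

-- ===== PORT B =====
-- while xs: cur = min(xs); best = max(best, cur - prev); xs.remove(cur); prev = cur
def pvSelLoop (xs : List Int) (prev best : Int) : Int :=
  match hm : PySem.List.min? xs (fun v => v) with
  | none => best
  | some cur => pvSelLoop ((PySem.List.remove? xs cur).getD []) cur (max best (cur - prev))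
termination_by xs.length
decreasing_by
  have hmem := PySem.List.min?_mem hm
  rw [PySem.List.remove?_eq_some_erase xs cur hmem]
  have h0 : 0 < xs.length := List.length_pos_of_mem hmem
  simp [List.length_erase_of_mem hmem]
  omega

def maxWidthOfVerticalArea2_alt (points : List (List Int)) : Int :=
  let xs := points.map (fun p => (PySem.List.pyGet? p 0).getD 0)
  match PySem.List.min? xs (fun v => v) with
  | none => 0  -- unreachable under Pre_ (Python min([]) raises ValueError)
  | some prev => pvSelLoop ((PySem.List.remove? xs prev).getD []) prev 0

-- ===== PRECONDITION & SPEC =====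
-- Pre_ excludes exactly the inputs on which Python A raises IndexError: the empty list (x[0]) and rows with no coordinates (i[0]).
def Pre_maxWidthOfVerticalArea2 (points : List (List Int)) : Prop :=
  points ≠ [] ∧ ∀ p ∈ points, p ≠ []
instance (points : List (List Int)) : Decidable (Pre_maxWidthOfVerticalArea2 points) := by
  unfold Pre_maxWidthOfVerticalArea2; infer_instance
def pvWitness_maxWidthOfVerticalArea2 : List (List Int) := [[3, 1], [9, 0], [1, 0]]

def Spec_maxWidthOfVerticalArea2 (points : List (List Int)) (out : Int) : Prop := out = maxWidthOfVerticalArea2_alt points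
instance (points : List (List Int)) (out : Int) : Decidable (Spec_maxWidthOfVerticalArea2 points out) := by unfold Spec_maxWidthOfVerticalArea2; infer_instance

-- ===== CLAIM (what is proved, stated in full; the proofs are below) =====
def Claim_equal_maxWidthOfVerticalArea2 : Prop := ∀ (points : List (List Int)), Dom_maxWidthOfVerticalArea2 points → Pre_maxWidthOfVerticalArea2 points → Spec_maxWidthOfVerticalArea2 points (maxWidthOfVerticalArea2 points)

-- ===== LEMMAS AND PROOFS =====

-- the value of min(xs) is the head of sorted(xs)
lemma pv_min_eq_sorted_head {xs : List Int} {m : Int} {t : List Int}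
    (hs : PySem.List.sorted xs (fun v => v) false = m :: t) :
    PySem.List.min? xs (fun v => v) = some m := by
  have hne : xs ≠ [] := by
    intro h; rw [h] at hs; simp [PySem.List.sorted] at hs
  obtain ⟨c, hc⟩ : ∃ c, PySem.List.min? xs (fun v => v) = some c := by
    cases h : PySem.List.min? xs (fun v => v) with
    | none => exact absurd ((PySem.List.min?_eq_none_iff xs (fun v => v)).mp h) hne
    | some c => exact ⟨c, rfl⟩
  have hcmem := PySem.List.min?_mem hc
  have hmmem : m ∈ xs := by
    have := PySem.List.mem_sorted xs (fun v => v) false m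
    rw [hs] at this; exact this.mp (by simp)
  have h1 : m ≤ c := PySem.List.key_head_sorted_le xs (fun v => v) hs c hcmem
  have h2 : c ≤ m := PySem.List.min?_isMin hc m hmmem
  rw [hc, le_antisymm h2 h1]

-- erasing the minimum value drops the head of the sorted list
lemma pv_sorted_erase {xs : List Int} {m : Int} {t : List Int}
    (hs : PySem.List.sorted xs (fun v => v) false = m :: t) :
    PySem.List.sorted (xs.erase m) (fun v => v) false = t := by
  have hperm : t.Perm (xs.erase m) := by
    have h1 : (PySem.List.sorted xs (fun v => v) false).erase m |>.Perm (xs.erase m) :=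
      (PySem.List.sorted_perm xs (fun v => v) false).erase m
    rw [hs] at h1; simpa using h1
  have hpw : t.Pairwise (· ≤ ·) := by
    have := PySem.List.sorted_pairwise xs (fun v => v)
    rw [hs] at this; exact this.tail
  exact PySem.List.sorted_id_eq_of_perm_of_pairwise _ _ hperm hpw

-- the selection loop computes the fold of A's body over the sorted list
lemma pv_selLoop_eq (n : ℕ) : ∀ (xs : List Int), xs.length = n → ∀ (prev best : Int),
    pvSelLoop xs prev best =
      ((PySem.List.sorted xs (fun v => v) false).foldl
        (fun s i => (max s.1 (i - s.2), i)) (best, prev)).1 := by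
  induction n using Nat.strong_induction_on with
  | _ n ih =>
    intro xs hn prev best
    cases hs : PySem.List.sorted xs (fun v => v) false with
    | nil =>
      have hxs : xs = [] := (PySem.List.sorted_eq_nil_iff xs (fun v => v) false).mp hs
      subst hxs
      rw [pvSelLoop.eq_def]; simp [PySem.List.min?]
    | cons m t =>
      have hmin := pv_min_eq_sorted_head hs
      have hmem := PySem.List.min?_mem hmin
      rw [pvSelLoop.eq_def, hmin]
      dsimp only
      rw [PySem.List.remove?_eq_some_erase xs m hmem]
      have hlen : (xs.erase m).length < n := by
        rw [List.length_erase_of_mem hmem]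
        have : 0 < xs.length := List.length_pos_of_mem hmem
        omega
      simp only [Option.getD_some]
      rw [ih _ hlen (xs.erase m) rfl m (max best (m - prev))]
      rw [pv_sorted_erase hs]
      simp [List.foldl]

-- ===== VERDICT (by name: the statement is the Claim_ definition above) =====
theorem maxWidthOfVerticalArea2_spec : Claim_equal_maxWidthOfVerticalArea2 := by
  intro points _ hpre
  unfold Spec_maxWidthOfVerticalArea2 maxWidthOfVerticalArea2 maxWidthOfVerticalArea2_alt
  have hne : points.map (fun p => (PySem.List.pyGet? p 0).getD 0) ≠ [] := by
    simpa using hpre.1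
  set ys := points.map (fun p => (PySem.List.pyGet? p 0).getD 0) with hys
  cases hs : PySem.List.sorted ys (fun v => v) false with
  | nil => exact absurd ((PySem.List.sorted_eq_nil_iff ys (fun v => v) false).mp hs) hne
  | cons m t =>
    have hmin := pv_min_eq_sorted_head hs
    have hmem := PySem.List.min?_mem hmin
    simp only [hmin]
    rw [PySem.List.remove?_eq_some_erase ys m hmem]
    simp only [Option.getD_some]
    rw [pv_selLoop_eq (ys.erase m).length (ys.erase m) rfl m 0]
    rw [pv_sorted_erase hs]
    simp [List.foldl]
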